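-- pv_equiv track=rewrite | github.com/miliar/Code_Jam_Webscraper | solutions_python/solutions_year13_round3_nr1/442.py | n_value
-- ===== SOURCE A (Python) =====
-- vowels = ('a','e','i','o','u')
--
-- def n_value(s, val):
-- 	count = 0
-- 	temp = s.lower()
-- 	while temp != "":
-- 		consenants = 0
-- 		for c in temp:
-- 			if consenants >= val:
-- 				count = count + 1
-- 			elif not c in vowels:
-- 				consenants += 1
-- 				if consenants == val:
-- 					count = count + 1
-- 			else:
-- 				consenants = 0
-- 		temp = temp[1:]
-- 	return count
-- ===== SOURCE B (Python) =====
-- def n_value(s, val):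
--     t = s.lower()
--     n = len(t)
--     if val <= 0:
--         return n * (n + 1) // 2
--     count = 0
--     run = 0
--     last = 0
--     i = 0
--     for c in t:
--         if c in 'aeiou':
--             run = 0
--         else:
--             run += 1
--         if run >= val:
--             last = i - val + 2
--         count += last
--         i += 1
--     return count
-- ===== Notes on version B (the rewrite author's own statement) =====
-- stated objective: faster
-- what changed: Instead of rescanning every suffix of the string (quadratic), B makes one pass keeping the trailing consonant-run length and the number of substring-starts covered by the latest val-length consonant run, adding that count at each position; val <= 0 is the closed form n*(n+1)//2 since every nonempty substring qualifies.
import Mathlib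
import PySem

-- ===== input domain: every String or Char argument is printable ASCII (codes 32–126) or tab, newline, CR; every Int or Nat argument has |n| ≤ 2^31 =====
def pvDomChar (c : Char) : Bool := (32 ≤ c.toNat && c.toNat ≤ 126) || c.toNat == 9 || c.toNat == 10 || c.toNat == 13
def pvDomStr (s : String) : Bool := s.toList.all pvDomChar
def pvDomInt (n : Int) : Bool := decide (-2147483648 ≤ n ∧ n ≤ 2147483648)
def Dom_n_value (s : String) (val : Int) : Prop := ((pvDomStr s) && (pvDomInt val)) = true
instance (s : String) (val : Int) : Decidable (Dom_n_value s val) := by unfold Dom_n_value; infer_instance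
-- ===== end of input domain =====

-- B replaces A's scan of every suffix (O(n^2)) by one forward pass tracking the trailing
-- consonant run and the number of covered substring starts; proved to return the same value.


-- ===== PORT A =====
def pvVowels : List Char := ['a', 'e', 'i', 'o', 'u']

-- one step of A's inner 'for c in temp' loop; state = (count, consenants)
def pvAStep (val : Int) (st : Int × Int) (c : Char) : Int × Int :=
  if st.2 ≥ val then (st.1 + 1, st.2)
  else if ¬ (c ∈ pvVowels) then
    (if st.2 + 1 = val then (st.1 + 1, st.2 + 1) else (st.1, st.2 + 1))
  else (st.1, 0)

-- A's outer 'while temp != ""' loop: scan temp with consenants = 0, then temp = temp[1:]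
def pvAOuter (val : Int) : List Char → Int → Int
  | [], count => count
  | c :: rest, count => pvAOuter val rest ((List.foldl (pvAStep val) (count, 0) (c :: rest)).1)

def n_value (s : String) (val : Int) : Int :=
  pvAOuter val (PySem.Str.lower s).toList 0

-- ===== PORT B =====
def pvIsCons (c : Char) : Bool := !(c ∈ "aeiou".toList)

-- one step of B's loop; state = (count, run, last, i)
def pvBStep (val : Int) (st : Int × Int × Int × Int) (c : Char) : Int × Int × Int × Int :=
  let run := if pvIsCons c then st.2.1 + 1 else 0
  let last := if run ≥ val then st.2.2.2 - val + 2 else st.2.2.1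
  (st.1 + last, run, last, st.2.2.2 + 1)

def n_value_alt (s : String) (val : Int) : Int :=
  let t := (PySem.Str.lower s).toList
  let n : Int := t.length
  if val ≤ 0 then PySem.Int.floordiv (n * (n + 1)) 2
  else (t.foldl (pvBStep val) (0, 0, 0, 0)).1

-- ===== PRECONDITION & SPEC =====
def Spec_n_value (s : String) (val : Int) (out : Int) : Prop := out = n_value_alt s val
instance (s : String) (val : Int) (out : Int) : Decidable (Spec_n_value s val out) := by unfold Spec_n_value; infer_instance

-- ===== CLAIM (what is proved, stated in full; the proofs are below) =====
def Claim_equal_n_value : Prop := ∀ (s : String) (val : Int), Dom_n_value s val → Spec_n_value s val (n_value s val)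

-- ===== LEMMAS AND PROOFS =====

-- length of the leading consonant run
def pvLead : List Char → Nat
  | [] => 0
  | c :: r => if pvIsCons c then pvLead r + 1 else 0

-- length of the trailing consonant run
def pvTrail (l : List Char) : Nat := pvLead l.reverse

-- some prefix of l ends in ≥ val consecutive consonants (for val ≥ 1: l contains such a run)
def pvHasRunAux (val : Int) : List Char → Bool
  | [] => false
  | c :: r => (decide ((pvLead (c :: r) : Int) ≥ val)) || pvHasRunAux val r

def pvHasRun (val : Int) (l : List Char) : Bool := pvHasRunAux val l.reverse

-- number of suffixes of l containing a val-consonant run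
def pvSufR (val : Int) : List Char → Int
  | [] => 0
  | c :: r => (if pvHasRun val (c :: r) then 1 else 0) + pvSufR val r

-- the 'consenants' value of A's inner scan after reading t
def pvConsState (val : Int) (t : List Char) : Int :=
  if pvHasRun val t then val else (pvTrail t : Int)

theorem pvNotVowel_iff (c : Char) : (¬ (c ∈ pvVowels)) ↔ pvIsCons c = true := by
  simp [pvVowels, pvIsCons]

theorem pvTrail_nil : pvTrail [] = 0 := rfl

theorem pvTrail_snoc (l : List Char) (c : Char) :
    pvTrail (l ++ [c]) = if pvIsCons c then pvTrail l + 1 else 0 := by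
  simp [pvTrail, pvLead]

theorem pvHasRun_nil (val : Int) : pvHasRun val [] = false := rfl

theorem pvHasRun_snoc (val : Int) (l : List Char) (c : Char) :
    pvHasRun val (l ++ [c]) =
      ((decide ((pvTrail (l ++ [c]) : Int) ≥ val)) || pvHasRun val l) := by
  simp [pvHasRun, pvHasRunAux, pvTrail]

theorem pvLead_le_length (l : List Char) : pvLead l ≤ l.length := by
  induction l with
  | nil => simp [pvLead]
  | cons c r ih => simp only [pvLead]; split <;> simp [*]

theorem pvTrail_le_length (l : List Char) : pvTrail l ≤ l.length := by
  simpa [pvTrail] using pvLead_le_length l.reverse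

theorem pvHasRun_of_trail (val : Int) (l : List Char) (h : (pvTrail l : Int) ≥ val)
    (hv : 1 ≤ val) : pvHasRun val l = true := by
  rcases l.eq_nil_or_concat with rfl | ⟨l', c, rfl⟩
  · simp [pvTrail] at h; omega
  · rw [List.concat_eq_append] at h ⊢
    rw [pvHasRun_snoc]
    simp [h]

theorem pvTrail_lt_of_not_hasRun (val : Int) (l : List Char) (hv : 1 ≤ val)
    (h : pvHasRun val l = false) : (pvTrail l : Int) < val := by
  by_contra hc
  have := pvHasRun_of_trail val l (by omega) hv
  simp [this] at h

theorem pvLead_append_singleton_ge (r : List Char) (d : Char) :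
    pvLead r ≤ pvLead (r ++ [d]) := by
  induction r with
  | nil => simp [pvLead]
  | cons c r' ih => simp only [List.cons_append, pvLead]; split <;> omega

theorem pvLead_append_singleton_cases (r : List Char) (d : Char) :
    pvLead (r ++ [d]) = pvLead r ∨
      (pvLead r = r.length ∧ pvLead (r ++ [d]) = r.length + 1) := by
  induction r with
  | nil =>
    simp only [List.nil_append, pvLead, List.length_nil]
    split <;> simp
  | cons c r' ih =>
    simp only [List.cons_append, pvLead, List.length_cons]
    split
    · rcases ih with h | ⟨h1, h2⟩
      · left; omega
      · right; omega
    · left; rfl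

theorem pvTrail_cons_le (d : Char) (m : List Char) : pvTrail m ≤ pvTrail (d :: m) := by
  simpa [pvTrail] using pvLead_append_singleton_ge m.reverse d

theorem pvTrail_cons_cases (d : Char) (m : List Char) :
    pvTrail (d :: m) = pvTrail m ∨
      (pvTrail m = m.length ∧ pvTrail (d :: m) = m.length + 1) := by
  simpa [pvTrail] using pvLead_append_singleton_cases m.reverse d

theorem pvHasRunAux_length (val : Int) (m : List Char) (h : pvHasRunAux val m = true) :
    val ≤ (m.length : Int) := by
  induction m with
  | nil => simp [pvHasRunAux] at h
  | cons c r ih =>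
    simp only [pvHasRunAux, Bool.or_eq_true, decide_eq_true_eq] at h
    rcases h with h | h
    · have := pvLead_le_length (c :: r); simp at this ⊢; omega
    · have := ih h; simp at this ⊢; omega

theorem pvHasRun_length (val : Int) (l : List Char) (h : pvHasRun val l = true) :
    val ≤ (l.length : Int) := by
  have := pvHasRunAux_length val l.reverse h
  simpa using this

theorem pvSufR_short (val : Int) (l : List Char) (h : (l.length : Int) < val) :
    pvSufR val l = 0 := by
  induction l with
  | nil => rfl
  | cons c r ih =>
    have hlen : ((c :: r).length : Int) = (r.length : Int) + 1 := by
      simp [List.length_cons]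
    have hr : pvHasRun val (c :: r) = false := by
      cases hcc : pvHasRun val (c :: r) with
      | false => rfl
      | true => exact absurd (pvHasRun_length val _ hcc) (by omega)
    have hih := ih (by omega)
    simp [pvSufR, hr, hih]

-- S2: appending a char that does not complete a run keeps pvSufR unchanged
theorem pvSufR_snoc_low (val : Int) (l : List Char) (c : Char)
    (h : (pvTrail (l ++ [c]) : Int) < val) : pvSufR val (l ++ [c]) = pvSufR val l := by
  induction l with
  | nil =>
    simp only [List.nil_append] at h
    have hr : pvHasRun val [c] = false := by
      rw [show ([c] : List Char) = [] ++ [c] from rfl, pvHasRun_snoc, pvHasRun_nil]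
      simp only [List.nil_append]
      simp [show ¬ ((pvTrail [c] : Int) ≥ val) by omega]
    simp [pvSufR, hr]
  | cons d r ih =>
    have htr : (pvTrail (r ++ [c]) : Int) < val := by
      have := pvTrail_cons_le d (r ++ [c])
      simp only [List.cons_append] at h
      omega
    have hhr : pvHasRun val ((d :: r) ++ [c]) = pvHasRun val (d :: r) := by
      rw [pvHasRun_snoc]
      simp only [List.cons_append] at h ⊢
      simp [show ¬ ((pvTrail (d :: (r ++ [c])) : Int) ≥ val) by omega]
    simp only [List.cons_append, pvSufR] at *
    rw [← List.cons_append] at hhr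
    simp only [List.cons_append] at hhr
    rw [hhr, ih htr]

-- S1: appending a char that completes a run: pvSufR becomes |l| - val + 2
theorem pvSufR_snoc_high (val : Int) (hv : 1 ≤ val) (l : List Char) (c : Char)
    (h : (pvTrail (l ++ [c]) : Int) ≥ val) :
    pvSufR val (l ++ [c]) = (l.length : Int) - val + 2 := by
  induction l with
  | nil =>
    simp only [List.nil_append] at h ⊢
    have h1 : pvTrail [c] ≤ 1 := by
      have := pvTrail_le_length [c]; simpa using this
    have hval : val = 1 := by omega
    subst hval
    have hr : pvHasRun 1 [c] = true := by
      have : ([c] : List Char) = [] ++ [c] := rfl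
      rw [this]
      exact pvHasRun_of_trail _ _ (by simpa using h) hv
    simp [pvSufR, hr]
  | cons d r ih =>
    have hr : pvHasRun val ((d :: r) ++ [c]) = true := pvHasRun_of_trail _ _ h hv
    by_cases hc : (pvTrail (r ++ [c]) : Int) ≥ val
    · have := ih hc
      simp only [List.cons_append, pvSufR] at *
      rw [← List.cons_append] at hr
      simp only [List.cons_append] at hr
      rw [hr, this]
      simp; omega
    · -- the run uses the whole of r ++ [c] plus d; val = |r| + 2
      rw [not_le] at hc
      have hcase := pvTrail_cons_cases d (r ++ [c])
      have hle : (pvTrail (d :: (r ++ [c])) : Int) ≥ val := by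
        simpa using h
      rcases hcase with heq | ⟨h1, h2⟩
      · rw [heq] at hle; omega
      · have hlen : ((r ++ [c]).length : Int) = (r.length : Int) + 1 := by simp
        have hval : val = (r.length : Int) + 2 := by
          rw [h2] at hle
          push_cast at hle h1 ⊢
          omega
        have hlow : pvSufR val (r ++ [c]) = pvSufR val r :=
          pvSufR_snoc_low val r c (by omega)
        have hshort : pvSufR val r = 0 := pvSufR_short val r (by omega)
        simp only [List.cons_append, pvSufR] at *
        rw [← List.cons_append] at hr
        simp only [List.cons_append] at hr
        rw [hr, hlow, hshort]
        simp; omega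

-- A's inner step splits count off: it adds the same delta for any starting count
theorem pvAStep_offset (val : Int) (count k : Int) (c : Char) :
    pvAStep val (count, k) c =
      (count + (pvAStep val (0, k) c).1, (pvAStep val (0, k) c).2) := by
  simp only [pvAStep]
  split_ifs <;> simp

theorem pvAFold_offset (val : Int) (t : List Char) :
    ∀ count k : Int, List.foldl (pvAStep val) (count, k) t =
      (count + (List.foldl (pvAStep val) (0, k) t).1,
       (List.foldl (pvAStep val) (0, k) t).2) := by
  induction t with
  | nil => intro count k; simp
  | cons c r ih =>
    intro count k
    simp only [List.foldl_cons]
    rw [pvAStep_offset]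
    rw [ih (count + (pvAStep val (0, k) c).1) (pvAStep val (0, k) c).2,
        ih (pvAStep val (0, k) c).1 (pvAStep val (0, k) c).2]
    simp [add_assoc]

-- the inner scan's state after t, and the delta contributed by a final char
theorem pvAFold_inv (val : Int) (hv : 1 ≤ val) :
    ∀ t : List Char,
      (List.foldl (pvAStep val) ((0 : Int), (0 : Int)) t).2 = pvConsState val t := by
  intro t
  induction t using List.reverseRecOn with
  | nil =>
    simp only [List.foldl_nil, pvConsState, pvHasRun_nil, pvTrail_nil]
    simp
  | append_singleton t c ih =>
    rw [List.foldl_append]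
    simp only [List.foldl_cons, List.foldl_nil]
    rcases hfold : List.foldl (pvAStep val) ((0 : Int), (0 : Int)) t with ⟨cnt, k⟩
    have hk : k = pvConsState val t := by rw [← ih, hfold]
    subst hk
    by_cases hr : pvHasRun val t = true
    · have h1 : pvConsState val t = val := by simp [pvConsState, hr]
      have h2 : pvHasRun val (t ++ [c]) = true := by
        rw [pvHasRun_snoc, hr]; simp
      simp [pvAStep, pvConsState, hr, h2]
    · have hrf : pvHasRun val t = false := by simpa using hr
      have htl : (pvTrail t : Int) < val := pvTrail_lt_of_not_hasRun val t hv hrf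
      have h1 : pvConsState val t = (pvTrail t : Int) := by simp [pvConsState, hrf]
      by_cases hcc : pvIsCons c = true
      · have htr : pvTrail (t ++ [c]) = pvTrail t + 1 := by rw [pvTrail_snoc, if_pos hcc]
        have hrun : pvHasRun val (t ++ [c]) = decide ((pvTrail t : Int) + 1 ≥ val) := by
          rw [pvHasRun_snoc, hrf, htr]; push_cast; simp
        simp only [pvAStep, h1]
        rw [if_neg (by omega), if_pos ((pvNotVowel_iff c).2 hcc)]
        by_cases heq : (pvTrail t : Int) + 1 = val
        · rw [if_pos heq]
          simp [pvConsState, hrun, htr]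
          omega
        · rw [if_neg heq]
          have : ¬ ((pvTrail t : Int) + 1 ≥ val) := by omega
          simp [pvConsState, hrun, this, htr]
      · have hvow : c ∈ pvVowels := by
          by_contra hnv
          exact hcc ((pvNotVowel_iff c).1 hnv)
        have htr : pvTrail (t ++ [c]) = 0 := by
          rw [pvTrail_snoc, if_neg (by simpa using hcc)]
        have hrun : pvHasRun val (t ++ [c]) = false := by
          rw [pvHasRun_snoc, hrf, htr]; simp; omega
        simp only [pvAStep, h1]
        rw [if_neg (by omega), if_neg (by simpa using hvow)]
        simp [pvConsState, hrun, htr]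

theorem pvAFold_snoc (val : Int) (hv : 1 ≤ val) (t : List Char) (c : Char) :
    (List.foldl (pvAStep val) ((0 : Int), (0 : Int)) (t ++ [c])).1 =
      (List.foldl (pvAStep val) ((0 : Int), (0 : Int)) t).1 +
        (if pvHasRun val (t ++ [c]) then 1 else 0) := by
  rw [List.foldl_append]
  simp only [List.foldl_cons, List.foldl_nil]
  rcases hfold : List.foldl (pvAStep val) ((0 : Int), (0 : Int)) t with ⟨cnt, k⟩
  have hk : k = pvConsState val t := by
    have := pvAFold_inv val hv t; rw [hfold] at this; exact this
  subst hk
  by_cases hr : pvHasRun val t = true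
  · have h2 : pvHasRun val (t ++ [c]) = true := by rw [pvHasRun_snoc, hr]; simp
    simp [pvAStep, pvConsState, hr, h2]
  · have hrf : pvHasRun val t = false := by simpa using hr
    have htl : (pvTrail t : Int) < val := pvTrail_lt_of_not_hasRun val t hv hrf
    have h1 : pvConsState val t = (pvTrail t : Int) := by simp [pvConsState, hrf]
    by_cases hcc : pvIsCons c = true
    · have htr : pvTrail (t ++ [c]) = pvTrail t + 1 := by rw [pvTrail_snoc, if_pos hcc]
      have hrun : pvHasRun val (t ++ [c]) = decide ((pvTrail t : Int) + 1 ≥ val) := by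
        rw [pvHasRun_snoc, hrf, htr]; push_cast; simp
      simp only [pvAStep, h1]
      rw [if_neg (by omega), if_pos ((pvNotVowel_iff c).2 hcc)]
      by_cases heq : (pvTrail t : Int) + 1 = val
      · rw [if_pos heq, hrun]
        simp; omega
      · rw [if_neg heq, hrun]
        have : ¬ ((pvTrail t : Int) + 1 ≥ val) := by omega
        simp [this]
    · have hvow : c ∈ pvVowels := by
        by_contra hnv; exact hcc ((pvNotVowel_iff c).1 hnv)
      have htr : pvTrail (t ++ [c]) = 0 := by
        rw [pvTrail_snoc, if_neg (by simpa using hcc)]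
      have hrun : pvHasRun val (t ++ [c]) = false := by
        rw [pvHasRun_snoc, hrf, htr]; simp; omega
      simp only [pvAStep, h1]
      rw [if_neg (by omega), if_neg (by simpa using hvow)]
      simp [hrun]

theorem pvAOuter_offset (val : Int) :
    ∀ (l : List Char) (count : Int), pvAOuter val l count = count + pvAOuter val l 0 := by
  intro l
  induction l with
  | nil => intro count; simp [pvAOuter]
  | cons c r ih =>
    intro count
    simp only [pvAOuter]
    rw [pvAFold_offset val (c :: r) count 0]
    rw [ih ((count + (List.foldl (pvAStep val) (0, 0) (c :: r)).1)),
        ih ((List.foldl (pvAStep val) ((0 : Int), (0 : Int)) (c :: r)).1)]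
    ring

-- A on l ++ [c] gains exactly the number of suffixes of l ++ [c] containing a run
theorem pvAOuter_snoc (val : Int) (hv : 1 ≤ val) :
    ∀ (l : List Char) (c : Char),
      pvAOuter val (l ++ [c]) 0 = pvAOuter val l 0 + pvSufR val (l ++ [c]) := by
  intro l
  induction l with
  | nil =>
    intro c
    simp only [List.nil_append, pvAOuter]
    have hsn := pvAFold_snoc val hv [] c
    simp only [List.nil_append, List.foldl_nil] at hsn
    rw [hsn]
    simp [pvSufR]
  | cons d r ih =>
    intro c
    simp only [List.cons_append, pvAOuter]
    rw [pvAOuter_offset val (r ++ [c]), pvAOuter_offset val r]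
    have hsnoc := pvAFold_snoc val hv (d :: r) c
    simp only [List.cons_append] at hsnoc
    rw [hsnoc, ih c]
    have hsuf : pvSufR val (d :: (r ++ [c])) =
        (if pvHasRun val (d :: (r ++ [c])) then 1 else 0) + pvSufR val (r ++ [c]) := rfl
    rw [hsuf]
    ring

-- B's fold invariant: state after l is (A's total, trailing run, pvSufR, length)
theorem pvBFold_inv (val : Int) (hv : 1 ≤ val) :
    ∀ l : List Char,
      List.foldl (pvBStep val) ((0 : Int), (0 : Int), (0 : Int), (0 : Int)) l =
        (pvAOuter val l 0, (pvTrail l : Int), pvSufR val l, (l.length : Int)) := by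
  intro l
  induction l using List.reverseRecOn with
  | nil => simp [pvAOuter, pvTrail_nil, pvSufR]
  | append_singleton l c ih =>
    rw [List.foldl_append, ih]
    simp only [List.foldl_cons, List.foldl_nil, pvBStep]
    have hrun : (if pvIsCons c then (pvTrail l : Int) + 1 else 0) =
        (pvTrail (l ++ [c]) : Int) := by
      rw [pvTrail_snoc]; split <;> simp
    rw [hrun]
    have hlast : (if (pvTrail (l ++ [c]) : Int) ≥ val then (l.length : Int) - val + 2
        else pvSufR val l) = pvSufR val (l ++ [c]) := by
      by_cases h : (pvTrail (l ++ [c]) : Int) ≥ val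
      · rw [if_pos h, pvSufR_snoc_high val hv l c h]
      · rw [if_neg h, pvSufR_snoc_low val l c (by omega)]
    rw [hlast, pvAOuter_snoc val hv l c]
    simp

-- val ≤ 0: A's inner scan counts every character
theorem pvAFold_nonpos (val : Int) (hv : val ≤ 0) :
    ∀ (t : List Char) (count : Int),
      List.foldl (pvAStep val) (count, (0 : Int)) t = (count + (t.length : Int), 0) := by
  intro t
  induction t with
  | nil => intro count; simp
  | cons c r ih =>
    intro count
    simp only [List.foldl_cons]
    have : pvAStep val (count, 0) c = (count + 1, 0) := by
      simp [pvAStep]; omega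
    rw [this, ih (count + 1)]
    simp
    omega

theorem pvAOuter_nonpos (val : Int) (hv : val ≤ 0) :
    ∀ l : List Char, 2 * pvAOuter val l 0 = (l.length : Int) * ((l.length : Int) + 1) := by
  intro l
  induction l with
  | nil => simp [pvAOuter]
  | cons c r ih =>
    simp only [pvAOuter]
    rw [pvAFold_nonpos val hv (c :: r) 0]
    rw [pvAOuter_offset]
    simp only [List.length_cons]
    push_cast
    rw [mul_add, ih]
    ring

-- ===== VERDICT (by name: the statement is the Claim_ definition above) =====
theorem n_value_spec : Claim_equal_n_value := by
  intro s val _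
  unfold Spec_n_value n_value n_value_alt
  set t := (PySem.Str.lower s).toList with ht
  by_cases hv : val ≤ 0
  · rw [if_pos hv]
    have h2 := pvAOuter_nonpos val hv t
    have heven : (t.length : Int) * ((t.length : Int) + 1) = 2 * pvAOuter val t 0 := h2.symm
    simp only [heven]
    rw [PySem.Int.floordiv_eq_ediv_of_pos (by omega)]
    omega
  · rw [if_neg hv]
    have := pvBFold_inv val (by omega) t
    rw [this]
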